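-- pv_equiv track=rewrite | github.com/signalnine/tildebin | scripts/baremetal/process_age_monitor.py | group_by_command
-- ===== SOURCE A (Python) =====
-- def group_by_command(processes: list[dict]) -> dict[str, list[dict]]:
--     """Group processes by command name."""
--     groups: dict[str, list[dict]] = {}
--     for proc in processes:
--         comm = proc["comm"]
--         if comm not in groups:
--             groups[comm] = []
--         groups[comm].append(proc)
--     return groups
-- ===== SOURCE B (Python) =====
-- def group_by_command(processes: list[dict]) -> dict[str, list[dict]]:
--     """Group processes by command name (two-pass: collect key order, then filter per key)."""
--     order = []
--     for proc in processes:
--         comm = proc["comm"]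
--         if comm not in order:
--             order.append(comm)
--     return {comm: [p for p in processes if p["comm"] == comm] for comm in order}
-- ===== Notes on version B (the rewrite author's own statement) =====
-- stated objective: alternative
-- what changed: A builds the groups in one pass with a dict accumulator; B makes two passes: it first collects the distinct command names in first-seen order, then builds each group by filtering the whole list per command, so no dict is mutated during the scan.
import Mathlib
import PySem

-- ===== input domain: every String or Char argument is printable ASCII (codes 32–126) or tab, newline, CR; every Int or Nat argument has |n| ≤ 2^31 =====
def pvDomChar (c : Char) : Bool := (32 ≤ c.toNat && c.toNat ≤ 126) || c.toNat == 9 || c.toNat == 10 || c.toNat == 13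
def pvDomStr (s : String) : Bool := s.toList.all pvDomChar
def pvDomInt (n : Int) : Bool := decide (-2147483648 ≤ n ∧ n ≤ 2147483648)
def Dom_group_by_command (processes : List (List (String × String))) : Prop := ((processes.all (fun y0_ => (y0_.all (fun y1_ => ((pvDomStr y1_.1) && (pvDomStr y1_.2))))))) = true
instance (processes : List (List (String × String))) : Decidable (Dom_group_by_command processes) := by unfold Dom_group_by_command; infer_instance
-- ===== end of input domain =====

-- B replaces A's one-pass dict-accumulator grouping by two passes (collect first-seen key order, then filter per key); alternative structure, not faster.


-- proc["comm"]: first-match lookup in the process dict (none = KeyError, excluded by Pre_)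
def pvComm (proc : List (String × String)) : Option String :=
  (PySem.Dict.mk proc).get? "comm"

-- ===== PORT A =====
-- one loop iteration of A: ensure the key exists, then append proc to groups[comm]
def pvStepA (groups : PySem.Dict String (List (List (String × String))))
    (proc : List (String × String)) : PySem.Dict String (List (List (String × String))) :=
  match pvComm proc with
  | none => groups   -- Python raises KeyError here; such inputs are outside Pre_
  | some comm =>
    let groups := if groups.contains comm then groups else groups.insert comm []
    groups.modify comm [] (fun l => l ++ [proc])

def group_by_command (processes : List (List (String × String))) :
    List (String × List (List (String × String))) :=
  (processes.foldl pvStepA PySem.Dict.empty).items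

-- ===== PORT B =====
-- first pass of B: collect distinct command names in first-seen order
def pvStepK (order : List String) (proc : List (String × String)) : List String :=
  match pvComm proc with
  | none => order   -- Python raises KeyError here; such inputs are outside Pre_
  | some comm => if order.contains comm then order else order ++ [comm]

def group_by_command_alt (processes : List (List (String × String))) :
    List (String × List (List (String × String))) :=
  (processes.foldl pvStepK []).map
    (fun comm => (comm, processes.filter (fun p => pvComm p == some comm)))

-- ===== PRECONDITION & SPEC =====
-- Pre_ excludes exactly the inputs where a process lacks the "comm" key: there Python A (and B) raise KeyError.
def Pre_group_by_command (processes : List (List (String × String))) : Prop :=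
  (processes.all (fun proc => (pvComm proc).isSome)) = true
instance (processes : List (List (String × String))) : Decidable (Pre_group_by_command processes) := by
  unfold Pre_group_by_command; infer_instance

def pvWitness_group_by_command : (List (List (String × String))) :=
  [[("comm", "bash"), ("pid", "1")], [("comm", "vim")], [("comm", "bash"), ("pid", "7")]]

def Spec_group_by_command (processes : List (List (String × String))) (out : List (String × List (List (String × String)))) : Prop := out = group_by_command_alt processes
instance (processes : List (List (String × String))) (out : List (String × List (List (String × String)))) : Decidable (Spec_group_by_command processes out) := by unfold Spec_group_by_command; infer_instance

-- ===== CLAIM (what is proved, stated in full; the proofs are below) =====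
def Claim_equal_group_by_command : Prop := ∀ (processes : List (List (String × String))), Dom_group_by_command processes → Pre_group_by_command processes → Spec_group_by_command processes (group_by_command processes)

-- ===== LEMMAS AND PROOFS =====

-- lookup in a dict whose items are keys paired by a function
theorem pv_get?_mk_map {ν : Type} (ks : List String) (F : String → ν) (c : String) :
    (PySem.Dict.mk (ks.map (fun k => (k, F k)))).get? c
      = if c ∈ ks then some (F c) else none := by
  induction ks with
  | nil => simp [PySem.Dict.get?]
  | cons k ks ih =>
    simp only [List.map_cons]
    rw [PySem.Dict.get?_mk_cons]
    by_cases hkc : k = c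
    · simp [hkc]
    · simp [hkc, Ne.symm hkc, ih]

-- B's first pass collects every command name occurring in ps (and keeps the accumulator)
theorem pv_keys_complete (ps : List (List (String × String))) (acc : List String) (c : String)
    (h : c ∈ acc ∨ ∃ p ∈ ps, pvComm p = some c) : c ∈ ps.foldl pvStepK acc := by
  induction ps generalizing acc with
  | nil => simpa using h.resolve_right (by simp)
  | cons q ps ih =>
    simp only [List.foldl_cons]
    apply ih
    rcases h with hacc | ⟨p, hp, hpc⟩
    · left
      cases hq : pvComm q with
      | none => simpa [pvStepK, hq] using hacc
      | some d =>
        simp only [pvStepK, hq]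
        split <;> simp [hacc]
    · rcases List.mem_cons.mp hp with rfl | hp'
      · left
        simp only [pvStepK, hpc]
        by_cases hm : c ∈ acc <;> simp [hm]
      · exact Or.inr ⟨p, hp', hpc⟩

-- modifying a present key rewrites exactly its value in the mapped items
theorem pv_modify_mk_map {ν : Type} (ks : List String) (F : String → ν) (c0 : String)
    (hmem : c0 ∈ ks) (d0 : ν) (g : ν → ν) :
    (PySem.Dict.mk (ks.map (fun k => (k, F k)))).modify c0 d0 g
      = PySem.Dict.mk (ks.map (fun k => (k, if k = c0 then g (F c0) else F k))) := by
  have hget : (PySem.Dict.mk (ks.map (fun k => (k, F k)))).get? c0 = some (F c0) := by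
    rw [pv_get?_mk_map]; simp [hmem]
  have hcon : (PySem.Dict.mk (ks.map (fun k => (k, F k)))).contains c0 = true := by
    rw [PySem.Dict.contains_eq_isSome_get?, hget]; rfl
  have hgetD : (PySem.Dict.mk (ks.map (fun k => (k, F k)))).getD c0 d0 = F c0 :=
    PySem.Dict.getD_of_get?_eq_some _ _ hget
  unfold PySem.Dict.modify PySem.Dict.insert
  rw [hgetD, if_pos hcon]
  simp only [List.map_map]
  congr 1
  apply List.map_congr_left
  intro k _
  by_cases hk : k = c0 <;> simp [hk]

-- the loop invariant: A's dict equals B's keys mapped to B's filtered groups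
theorem pv_main (ps : List (List (String × String))) :
    ps.foldl pvStepA PySem.Dict.empty
      = PySem.Dict.mk ((ps.foldl pvStepK []).map
          (fun c => (c, ps.filter (fun p => pvComm p == some c)))) := by
  induction ps using List.reverseRecOn with
  | nil => rfl
  | append_singleton ps p ih =>
    rw [List.foldl_append, List.foldl_append, ih]
    simp only [List.foldl_cons, List.foldl_nil]
    set ks := ps.foldl pvStepK [] with hks
    cases hp : pvComm p with
    | none =>
      simp only [pvStepA, pvStepK, hp]
      congr 1
      apply List.map_congr_left
      intro c _
      simp [List.filter_append, hp]
    | some c0 =>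
      set F : String → List (List (String × String)) :=
        fun c => ps.filter (fun p => pvComm p == some c) with hF
      have hstep : ∀ ks' : List String, c0 ∈ ks' →
          (PySem.Dict.mk (ks'.map (fun c => (c, F c)))).modify c0 [] (fun l => l ++ [p])
            = PySem.Dict.mk (ks'.map
                (fun c => (c, (ps ++ [p]).filter (fun q => pvComm q == some c)))) := by
        intro ks' hmem
        rw [pv_modify_mk_map ks' F c0 hmem]
        congr 1
        apply List.map_congr_left
        intro c _
        by_cases hc : c = c0
        · subst hc
          simp [hF, List.filter_append, hp]
        · have hne : (pvComm p == some c) = false := by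
            simp [hp]; exact fun h => hc h.symm
          simp [hF, List.filter_append, hne, hc]
      simp only [pvStepA, pvStepK, hp]
      by_cases hmem : c0 ∈ ks
      · -- key already present: A modifies in place, B keeps the key order
        have h1 : (PySem.Dict.mk (ks.map (fun c => (c, F c)))).contains c0 = true := by
          rw [PySem.Dict.contains_eq_isSome_get?, pv_get?_mk_map]; simp [hmem]
        have h2 : ks.contains c0 = true := by simpa using hmem
        rw [if_pos h1, if_pos h2]
        exact hstep ks hmem
      · -- new key: A appends (c0, []) then modifies; B appends c0 to the order
        have h1 : (PySem.Dict.mk (ks.map (fun c => (c, F c)))).contains c0 = false := by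
          rw [PySem.Dict.contains_eq_isSome_get?, pv_get?_mk_map]; simp [hmem]
        have h2 : ks.contains c0 = false := by simpa using hmem
        rw [if_neg (by rw [h1]; simp), if_neg (by rw [h2]; simp)]
        have hF0 : F c0 = [] := by
          rw [hF]
          rw [List.filter_eq_nil_iff]
          intro q hq hqc
          exact hmem (pv_keys_complete ps [] c0 (Or.inr ⟨q, hq, by simpa using hqc⟩))
        have hin : (PySem.Dict.mk (ks.map (fun c => (c, F c)))).insert c0 []
            = PySem.Dict.mk ((ks ++ [c0]).map (fun c => (c, F c))) := by
          unfold PySem.Dict.insert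
          rw [h1]
          simp [hF0]
        rw [hin]
        exact hstep (ks ++ [c0]) (by simp)

-- ===== VERDICT (by name: the statement is the Claim_ definition above) =====
theorem group_by_command_spec : Claim_equal_group_by_command := by
  intro processes _ _
  unfold Spec_group_by_command group_by_command group_by_command_alt
  rw [pv_main]
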